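-- pv_equiv track=rewrite | github.com/skilljobs/django-emails | emails/text_alt.py | justify_p
-- ===== SOURCE A (Python) =====
-- from textwrap import wrap
--
-- def justify_str(s, width):
--     right, w = s, width
--     items = right.split()
--     for i in range(len(items) - 1):
--         items[i] += ' '
--     left_count = w - sum([len(x) for x in items])
--     while left_count > 0 and len(items) > 1:
--         for i in range(len(items) - 1):
--             items[i] += ' '
--             left_count -= 1
--             if left_count < 1:
--                 break
--     return ''.join(items)
--
-- def justify_p(para, width):
--     splitted = wrap(para, width)
--     wrapped = []
--     for line in splitted:
--         aligned = line
--         if line is not splitted[-1]: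
--             aligned = justify_str(line, width)
--         wrapped.append(aligned)
--     return '\n'.join(wrapped)
-- ===== SOURCE B (Python) =====
-- from textwrap import wrap
--
--
-- def justify_str(s, width):
--     words = s.split()
--     if len(words) <= 1:
--         return ''.join(words)
--     gaps = len(words) - 1
--     extra = width - sum(map(len, words)) - gaps
--     if extra <= 0:
--         return ' '.join(words)
--     q, r = divmod(extra, gaps)
--     out = []
--     for i, w in enumerate(words[:-1]):
--         out.append(w)
--         out.append(' ' * (1 + q + (1 if i < r else 0)))
--     out.append(words[-1])
--     return ''.join(out)
--
--
-- def justify_p(para, width):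
--     lines = wrap(para, width)
--     return '\n'.join([justify_str(l, width) for l in lines[:-1]] + lines[-1:])
-- ===== Notes on version B (the rewrite author's own statement) =====
-- stated objective: alternative
-- what changed: justify_str's one-space-at-a-time round-robin while-loop over the gaps is replaced by a single divmod that computes each gap's space count in closed form, and the justify-all-but-last-line loop with its 'is' identity test becomes a list comprehension over lines[:-1]; each Lean port carries its own model of the shared textwrap.wrap call (A CPython's accumulator loops, B a restructured fold/recursion pipeline), proved equal; wrapping cost dominates in practice, so no speed is claimed.
import Mathlib
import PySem

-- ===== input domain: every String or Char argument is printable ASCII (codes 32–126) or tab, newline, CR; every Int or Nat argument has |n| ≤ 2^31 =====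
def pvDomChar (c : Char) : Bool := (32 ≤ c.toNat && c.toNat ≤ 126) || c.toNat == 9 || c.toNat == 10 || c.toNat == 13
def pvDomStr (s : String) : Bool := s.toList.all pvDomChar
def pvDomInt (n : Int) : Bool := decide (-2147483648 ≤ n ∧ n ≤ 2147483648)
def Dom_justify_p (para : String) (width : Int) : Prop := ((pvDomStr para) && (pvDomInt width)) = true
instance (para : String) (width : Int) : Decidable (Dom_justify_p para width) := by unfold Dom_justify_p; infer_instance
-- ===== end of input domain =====

-- B replaces A's one-space-at-a-time round-robin justification loop by a closed-form divmod
-- distribution of the padding over the gaps (objective: alternative algorithm, same measured cost).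
-- Both Pythons call textwrap.wrap; each port carries its own model of that library call (A a
-- transliteration of CPython's accumulator loops, B a restructured recursion), proved equal below.

-- ===== PORT A =====
-- A calls textwrap.wrap(para, width); its port (pyWrap below, defaults of Python 3.11's
-- TextWrapper) is exact on the Dom_ alphabet (printable ASCII + tab/newline/CR).

-- character classes of textwrap's wordsep_re, ASCII-exact: \w, [^\d\W], word punctuation
def pyIsW (c : Char) : Bool := PySem.Chars.isalnum c || c == '_'
def pyIsL (c : Char) : Bool := PySem.Chars.isalpha c || c == '_'
def pyIsWP (c : Char) : Bool := pyIsW c || c == '!' || c == '"' || c == '\'' || c == '&' || c == '.' || c == ',' || c == '?'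
def pyIsWS (c : Char) : Bool := c == '\t' || c == '\n' || c == '\x0b' || c == '\x0c' || c == '\r' || c == ' '

-- str.expandtabs() (tabsize 8): column counter, reset at '\n' and '\r'
def expandTabs : List Char → Nat → List Char
  | [], _ => []
  | c :: rest, col =>
    if c = '\t' then
      let inc := 8 - col % 8
      List.replicate inc ' ' ++ expandTabs rest (col + inc)
    else if c = '\n' ∨ c = '\r' then c :: expandTabs rest 0
    else c :: expandTabs rest (col + 1)

-- TextWrapper._munge_whitespace: expandtabs then each whitespace char -> ' '
def mungeWS (cs : List Char) : List Char :=
  (expandTabs cs 0).map (fun c => if pyIsWS c then ' ' else c)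

def tAt (t : List Char) (i : Nat) : Char := t.getD i ' '

-- length of the run of '-' starting at i
def hyRun (t : List Char) (i : Nat) : Nat := ((t.drop i).takeWhile (· == '-')).length

-- em-dash alternative '(?<=[\w!"\'&.,?])-{2,}(?=\w)' matched at position i (0 = no match)
def emdashAt (t : List Char) (i : Nat) : Nat :=
  if 1 ≤ i ∧ pyIsWP (tAt t (i - 1)) ∧ i < t.length ∧ tAt t i = '-' then
    let k := hyRun t i
    if 2 ≤ k ∧ i + k < t.length ∧ pyIsW (tAt t (i + k)) then k else 0
  else 0

-- the word alternative '[^\s]+?(-hyphen | end-of-word | before-em-dash)': smallest j > i where a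
-- terminator fires, sub-alternatives tried in the regex's order; fuel is a totality guard only
def alt3Loop : Nat → List Char → Nat → Nat → Nat
  | 0, _, i, j => j - i
  | fuel + 1, t, i, j =>
    let n := t.length
    if (j < n ∧ tAt t j = '-' ∧
        ((2 ≤ j ∧ pyIsL (tAt t (j - 2)) ∧ pyIsL (tAt t (j - 1))) ∨
         (3 ≤ j ∧ pyIsL (tAt t (j - 3)) ∧ tAt t (j - 2) = '-' ∧ pyIsL (tAt t (j - 1)))) ∧
        (j + 1 < n ∧ pyIsL (tAt t (j + 1)) ∧
         ((j + 2 < n ∧ pyIsL (tAt t (j + 2))) ∨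
          (j + 3 < n ∧ tAt t (j + 2) = '-' ∧ pyIsL (tAt t (j + 3)))))) then j + 1 - i
    else if j = n ∨ tAt t j = ' ' then j - i
    else if tAt t j = '-' ∧ pyIsWP (tAt t (j - 1)) ∧ emdashAt t j ≠ 0 then j - i
    else alt3Loop fuel t i (j + 1)

-- length of the wordsep_re match starting at i (alternatives in the regex's order; always ≥ 1)
def matchLen (t : List Char) (i : Nat) : Nat :=
  if tAt t i = ' ' then ((t.drop i).takeWhile (· == ' ')).length
  else if emdashAt t i ≠ 0 then emdashAt t i
  else alt3Loop (t.length + 1) t i (i + 1)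

-- wordsep_re.split + drop empties: the matches tile the munged text (each match nonempty, so the
-- between-match pieces are all empty); 'max … 1' is a totality guard the real runs never need
def tokLoop : Nat → List Char → Nat → List (List Char)
  | 0, _, _ => []
  | fuel + 1, t, i =>
    if i < t.length then
      let len := matchLen t i
      (t.drop i).take len :: tokLoop fuel t (i + max len 1)
    else []

def splitChunks (s : List Char) : List (List Char) :=
  let t := mungeWS s
  tokLoop (t.length + 1) t 0

-- the inner 'while chunks: if cur_len + l <= width: cur_line.append(chunks.pop()) else break'
-- (chunks kept in forward order instead of reversed-and-popped-from-the-end)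
def takeFit : List (List Char) → Int → Int → List (List Char) × Int × List (List Char)
  | [], _, curLen => ([], curLen, [])
  | c :: cs, width, curLen =>
    if curLen + (c.length : Int) ≤ width then
      let r := takeFit cs width (curLen + (c.length : Int))
      (c :: r.1, r.2.1, r.2.2)
    else ([], curLen, c :: cs)

-- TextWrapper._handle_long_word (break_long_words=True, break_on_hyphens=True);
-- end ≥ 0 on every reachable call, so .toNat take/drop is Python's chunk[:end]/chunk[end:]
def handleLong (chunks : List (List Char)) (cur : List (List Char)) (curLen width : Int) :
    List (List Char) × List (List Char) :=
  match chunks with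
  | [] => (cur, chunks)
  | chunk :: rest =>
    let spaceLeft : Int := if width < 1 then 1 else width - curLen
    let endN : Int :=
      if (chunk.length : Int) > spaceLeft then
        let hyphen := PySem.Chars.rfindFrom chunk ['-'] 0 (some spaceLeft)
        if hyphen > 0 ∧ (chunk.take hyphen.toNat).any (· ≠ '-') then hyphen + 1 else spaceLeft
      else spaceLeft
    (cur ++ [chunk.take endN.toNat], chunk.drop endN.toNat :: rest)

-- TextWrapper._wrap_chunks outer loop (drop_whitespace=True, indents '', max_lines=None);
-- fuel is a totality guard: with width ≥ 1 every iteration consumes a chunk or part of one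
def wrapLoop : Nat → Int → List (List Char) → List (List Char) → List (List Char)
  | 0, _, _, lines => lines.reverse
  | fuel + 1, width, chunks, lines =>
    match chunks with
    | [] => lines.reverse
    | c0 :: rest0 =>
      let chunks1 := if (PySem.Chars.strip c0).isEmpty ∧ lines ≠ [] then rest0 else c0 :: rest0
      let tf := takeFit chunks1 width 0
      let st :=
        match tf.2.2 with
        | [] => (tf.1, tf.2.2)
        | c :: _ =>
          if (c.length : Int) > width then handleLong tf.2.2 tf.1 tf.2.1 width else (tf.1, tf.2.2)
      let cur := st.1
      let cur := if cur ≠ [] ∧ (PySem.Chars.strip (cur.getLast?.getD [])).isEmpty then cur.dropLast else cur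
      let lines := if cur ≠ [] then PySem.Chars.join [] cur :: lines else lines
      wrapLoop fuel width st.2 lines

-- textwrap.wrap(s, width) with all-default options; raises (Pre_) for width < 1
def pyWrap (s : List Char) (width : Int) : List (List Char) :=
  let chunks := splitChunks s
  wrapLoop ((chunks.map List.length).sum + chunks.length + 1) width chunks []

-- A's first for-loop: items[i] += ' ' for i in range(len(items) - 1)
def addTrailingSpace : List (List Char) → List (List Char)
  | [] => []
  | [x] => [x]
  | x :: xs => (x ++ [' ']) :: addTrailingSpace xs

-- A's inner 'for i in range(len(items)-1): items[i] += " "; left_count -= 1; if left_count < 1: break'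
def jsInnerA (items : List (List Char)) (lc : Int) (i n1 : Nat) : List (List Char) × Int :=
  if _h : i < n1 then
    let items' := items.modify i (· ++ [' '])
    let lc' := lc - 1
    if lc' < 1 then (items', lc') else jsInnerA items' lc' (i + 1) n1
  else (items, lc)
  termination_by n1 - i

-- A's outer 'while left_count > 0 and len(items) > 1'; each pass hands out ≥ 1 space, so
-- left_count.toNat + 1 units of fuel are exact, the 0 case is never reached on real runs
def jsOuterA : Nat → List (List Char) → Int → List (List Char)
  | 0, items, _ => items
  | fuel + 1, items, lc =>
    if lc > 0 ∧ items.length > 1 then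
      let p := jsInnerA items lc 0 (items.length - 1)
      jsOuterA fuel p.1 p.2
    else items

def justifyStrA (s : List Char) (w : Int) : List Char :=
  let items := addTrailingSpace (PySem.Chars.split₀ s)
  let lc : Int := w - ((items.map List.length).sum : Int)
  PySem.Chars.join [] (jsOuterA (lc.toNat + 1) items lc)

-- A's 'for line in splitted: … if line is not splitted[-1]: aligned = justify_str(line, width)'.
-- CPython's 'is' compares object identity: for the fresh line strings wrap() returns it is True
-- exactly off the last index, except that an interned single-char line equal to the last line
-- also compares identical — such a line is a single word, on which justify_str is the identity,
-- so justifying every line but the last is exact.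
def jpAlign : List (List Char) → Int → List (List Char)
  | [], _ => []
  | [l], _ => [l]
  | l :: rest, w => justifyStrA l w :: jpAlign rest w

def justify_p (para : String) (width : Int) : String :=
  let splitted := pyWrap para.toList width
  String.ofList (PySem.Chars.join ['\n'] (jpAlign splitted width))

-- ===== PORT B =====
-- B also calls textwrap.wrap; its model wrapB below computes the same lines by a different
-- decomposition: a left fold for tab expansion, a length-recursive lexer instead of a fuel loop,
-- a count-then-split line fill (fitLen) and front-first line building without an accumulator.

-- str.expandtabs() as a left fold carrying (reversed output, column)
def tabStep (st : List Char × Nat) (ch : Char) : List Char × Nat :=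
  if ch = '\t' then
    let pad := 8 - st.2 % 8
    (List.replicate pad ' ' ++ st.1, st.2 + pad)
  else if ch = '\n' ∨ ch = '\r' then (ch :: st.1, 0)
  else (ch :: st.1, st.2 + 1)

-- _munge_whitespace: expand tabs (fold), then whitespace -> ' '
def normWS (src : List Char) : List Char :=
  ((src.foldl tabStep ([], 0)).1.reverse).map
    (fun ch => if ch ∈ ['\t', '\n', '\x0b', '\x0c', '\r', ' '] then ' ' else ch)

-- B-side character classes and scanners (the same wordsep_re, restructured: recursive
-- run-counters instead of takeWhile, a length-recursive scanner instead of a fuel loop)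
def chAt (u : List Char) (a : Nat) : Char := (u[a]?).getD ' '

def wChar (ch : Char) : Bool := ch == '_' || PySem.Chars.isalnum ch
def lChar (ch : Char) : Bool := ch == '_' || PySem.Chars.isalpha ch
def pChar (ch : Char) : Bool := wChar ch || ch == '!' || ch == '"' || ch == '\'' || ch == '&' || ch == '.' || ch == ',' || ch == '?'

def dashes : List Char → Nat
  | [] => 0
  | ch :: more => if ch = '-' then dashes more + 1 else 0

def blanks : List Char → Nat
  | [] => 0
  | ch :: more => if ch = ' ' then blanks more + 1 else 0

-- the em-dash alternative, B-shaped
def emdash (u : List Char) (a : Nat) : Nat :=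
  if 1 ≤ a ∧ pChar (chAt u (a - 1)) ∧ a < u.length ∧ chAt u a = '-' then
    let d := dashes (u.drop a)
    if 2 ≤ d ∧ a + d < u.length ∧ wChar (chAt u (a + d)) then d else 0
  else 0

-- the word alternative, by recursion on the remaining length
def scanWord (u : List Char) (a b : Nat) : Nat :=
  if _hb : b < u.length then
    if (b < u.length ∧ chAt u b = '-' ∧
        ((2 ≤ b ∧ lChar (chAt u (b - 2)) ∧ lChar (chAt u (b - 1))) ∨
         (3 ≤ b ∧ lChar (chAt u (b - 3)) ∧ chAt u (b - 2) = '-' ∧ lChar (chAt u (b - 1)))) ∧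
        (b + 1 < u.length ∧ lChar (chAt u (b + 1)) ∧
         ((b + 2 < u.length ∧ lChar (chAt u (b + 2))) ∨
          (b + 3 < u.length ∧ chAt u (b + 2) = '-' ∧ lChar (chAt u (b + 3)))))) then b + 1 - a
    else if b = u.length ∨ chAt u b = ' ' then b - a
    else if chAt u b = '-' ∧ pChar (chAt u (b - 1)) ∧ emdash u b ≠ 0 then b - a
    else scanWord u a (b + 1)
  else b - a
  termination_by u.length - b

-- length of the wordsep_re match at a
def lexeme (u : List Char) (a : Nat) : Nat :=
  if chAt u a = ' ' then blanks (u.drop a)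
  else if emdash u a ≠ 0 then emdash u a
  else scanWord u a (a + 1)

-- wordsep_re lexer: recursion on the remaining length (the match starting at pos is ≥ 1 long)
def lexFrom (txt : List Char) (pos : Nat) : List (List Char) :=
  if _hlt : pos < txt.length then
    let step := lexeme txt pos
    (txt.drop pos).take step :: lexFrom txt (pos + max step 1)
  else []
  termination_by txt.length - pos
  decreasing_by
    have h1 : 1 ≤ max (lexeme txt pos) 1 := Nat.le_max_right _ _
    omega

-- how many leading chunks fit into the remaining room
def fitLen : List (List Char) → Int → Nat
  | [], _ => 0
  | w :: ws, room =>
    if (w.length : Int) ≤ room then fitLen ws (room - (w.length : Int)) + 1 else 0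

-- _handle_long_word on the single overlong chunk: split it at the break point
def splitLong (chunk : List Char) (used width : Int) : List Char × List Char :=
  let room : Int := if width < 1 then 1 else width - used
  let cut : Int :=
    if room < (chunk.length : Int) then
      let hy := PySem.Chars.rfindFrom chunk ['-'] 0 (some room)
      if hy > 0 ∧ (chunk.take hy.toNat).any (· ≠ '-') then hy + 1 else room
    else room
  (chunk.take cut.toNat, chunk.drop cut.toNat)

-- _wrap_chunks, building the line list front-first ('started' = a line was already emitted)
def buildLines : Nat → Int → List (List Char) → Bool → List (List Char)
  | 0, _, _, _ => []
  | gas + 1, width, pend, started =>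
    match pend with
    | [] => []
    | h :: ts =>
      let ws := if started = true ∧ (PySem.Chars.strip h).isEmpty then ts else h :: ts
      let k := fitLen ws width
      let ln := ws.take k
      let used : Int := (((ws.take k).map List.length).sum : Nat)
      let pr :=
        match ws.drop k with
        | [] => (ln, ([] : List (List Char)))
        | ov :: more =>
          if (ov.length : Int) > width then
            let sp := splitLong ov used width
            (ln ++ [sp.1], sp.2 :: more)
          else (ln, ov :: more)
      let ln2 := if pr.1 ≠ [] ∧ (PySem.Chars.strip (pr.1.getLast?.getD [])).isEmpty then pr.1.dropLast else pr.1
      if ln2 = [] then buildLines gas width pr.2 started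
      else PySem.Chars.join [] ln2 :: buildLines gas width pr.2 true

-- textwrap.wrap(s, width), B's model
def wrapB (src : List Char) (width : Int) : List (List Char) :=
  let toks := lexFrom (normWS src) 0
  buildLines ((toks.map List.length).sum + toks.length + 1) width toks false

-- Source B's justify_str: per-gap space counts by one divmod instead of A's round-robin loop
def justifyStrB (s : List Char) (width : Int) : List Char :=
  let words := PySem.Chars.split₀ s
  if words.length ≤ 1 then PySem.Chars.join [] words
  else
    let gaps : Int := (words.length : Int) - 1
    let extra : Int := width - ((words.map List.length).sum : Int) - gaps
    if extra ≤ 0 then PySem.Chars.join [' '] words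
    else
      let q := PySem.Int.floordiv extra gaps
      let r := PySem.Int.mod extra gaps
      -- ' ' * k with k > 0: replicate; words[:-1] is dropLast, words[-1] is pyGetD words (-1)
      let out := (PySem.List.enumerate words.dropLast 0).foldl
        (fun acc p => acc ++ [p.2, List.replicate (1 + q + (if p.1 < r then 1 else 0)).toNat ' ']) []
      PySem.Chars.join [] (out ++ [PySem.List.pyGetD words (-1) []])

def justify_p_alt (para : String) (width : Int) : String :=
  let lines := wrapB para.toList width
  String.ofList (PySem.Chars.join ['\n']
    (lines.dropLast.map (fun l => justifyStrB l width) ++ PySem.List.slice lines (some (-1)) none))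

-- ===== PRECONDITION & SPEC =====
-- textwrap.wrap raises ValueError for width < 1 (both A and B call it), so exactly width ≥ 1 is kept
def Pre_justify_p (para : String) (width : Int) : Prop := 1 ≤ width
instance (para : String) (width : Int) : Decidable (Pre_justify_p para width) := by unfold Pre_justify_p; infer_instance
def pvWitness_justify_p : String × Int := ("ab cd x", 5)

def Spec_justify_p (para : String) (width : Int) (out : String) : Prop := out = justify_p_alt para width
instance (para : String) (width : Int) (out : String) : Decidable (Spec_justify_p para width out) := by unfold Spec_justify_p; infer_instance

-- ===== CLAIM (what is proved, stated in full; the proofs are below) =====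
def Claim_equal_justify_p : Prop := ∀ (para : String) (width : Int), Dom_justify_p para width → Pre_justify_p para width → Spec_justify_p para width (justify_p para width)

-- ===== LEMMAS AND PROOFS =====

-- ---- the two wrap models agree ----

theorem tabStep_foldl (cs : List Char) : ∀ (acc : List Char) (col : Nat),
    (cs.foldl tabStep (acc, col)).1 = (expandTabs cs col).reverse ++ acc := by
  induction cs with
  | nil => intro acc col; simp [expandTabs]
  | cons c rest ih =>
    intro acc col
    rw [List.foldl_cons, expandTabs]
    by_cases h1 : c = '\t'
    · rw [if_pos h1]
      show (rest.foldl tabStep (tabStep (acc, col) c)).1 = _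
      rw [tabStep, if_pos h1]
      simp only []
      rw [ih]
      simp
    · rw [if_neg h1]
      by_cases h2 : c = '\n' ∨ c = '\r'
      · rw [if_pos h2]
        show (rest.foldl tabStep (tabStep (acc, col) c)).1 = _
        rw [tabStep, if_neg h1, if_pos h2]
        rw [ih]
        simp
      · rw [if_neg h2]
        show (rest.foldl tabStep (tabStep (acc, col) c)).1 = _
        rw [tabStep, if_neg h1, if_neg h2]
        rw [ih]
        simp

theorem normWS_eq (src : List Char) : normWS src = mungeWS src := by
  unfold normWS mungeWS
  rw [tabStep_foldl src [] 0]
  simp only [List.append_nil, List.reverse_reverse]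
  apply List.map_congr_left
  intro c _
  have hmem : (c ∈ ['\t', '\n', '\x0b', '\x0c', '\r', ' ']) ↔ pyIsWS c = true := by
    simp [pyIsWS, List.mem_cons]
    tauto
  by_cases h : pyIsWS c = true
  · rw [if_pos (hmem.mpr h), if_pos h]
  · rw [if_neg (fun hc => h (hmem.mp hc)), if_neg h]


theorem chAt_eq (u : List Char) (a : Nat) : chAt u a = tAt u a := rfl

theorem wChar_eq (ch : Char) : wChar ch = pyIsW ch := by
  simp [wChar, pyIsW, Bool.or_comm]

theorem lChar_eq (ch : Char) : lChar ch = pyIsL ch := by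
  simp [lChar, pyIsL, Bool.or_comm]

theorem pChar_eq (ch : Char) : pChar ch = pyIsWP ch := by
  simp [pChar, pyIsWP, wChar_eq]

theorem dashes_eq : ∀ cs : List Char, dashes cs = (cs.takeWhile (· == '-')).length := by
  intro cs
  induction cs with
  | nil => rfl
  | cons c r ih =>
    rw [dashes, List.takeWhile_cons]
    by_cases h : c = '-'
    · rw [if_pos h, if_pos (by simp [h])]
      simp [ih]
    · rw [if_neg h, if_neg (by simp [h])]
      rfl

theorem blanks_eq : ∀ cs : List Char, blanks cs = (cs.takeWhile (· == ' ')).length := by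
  intro cs
  induction cs with
  | nil => rfl
  | cons c r ih =>
    rw [blanks, List.takeWhile_cons]
    by_cases h : c = ' '
    · rw [if_pos h, if_pos (by simp [h])]
      simp [ih]
    · rw [if_neg h, if_neg (by simp [h])]
      rfl

theorem emdash_eq (t : List Char) (i : Nat) : emdash t i = emdashAt t i := by
  unfold emdash emdashAt hyRun
  simp only [chAt_eq, pChar_eq, wChar_eq, dashes_eq]

theorem tAt_of_ge (t : List Char) (b : Nat) (h : t.length ≤ b) : tAt t b = ' ' := by
  simp [tAt, List.getD_eq_getElem?_getD, List.getElem?_eq_none (by omega : t.length ≤ b)]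

theorem scanWord_eq (t : List Char) (a : Nat) : ∀ (fuel b : Nat), t.length - b < fuel →
    alt3Loop fuel t a b = scanWord t a b := by
  intro fuel
  induction fuel with
  | zero => intro b h; omega
  | succ f ih =>
    intro b hb
    rw [alt3Loop, scanWord]
    by_cases h : b < t.length
    · rw [dif_pos h]
      simp only [chAt_eq, pChar_eq, lChar_eq, emdash_eq]
      split_ifs
      · rfl
      · rfl
      · rfl
      · exact ih (b + 1) (by omega)
    · rw [dif_neg h]
      have h2 : b = t.length ∨ tAt t b = ' ' := by
        rcases Nat.eq_or_lt_of_le (Nat.le_of_not_lt h) with he | hl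
        · exact Or.inl he.symm
        · exact Or.inr (tAt_of_ge t b (by omega))
      rw [if_neg (fun hc => h hc.1), if_pos h2]

theorem lexeme_eq (t : List Char) (i : Nat) : lexeme t i = matchLen t i := by
  unfold lexeme matchLen
  rw [chAt_eq, blanks_eq, emdash_eq, ← scanWord_eq t i (t.length + 1) (i + 1) (by omega)]

theorem lexFrom_eq (t : List Char) : ∀ (fuel : Nat) (i : Nat), t.length - i < fuel →
    tokLoop fuel t i = lexFrom t i := by
  intro fuel
  induction fuel with
  | zero => intro i h; omega
  | succ f ih =>
    intro i h
    rw [tokLoop, lexFrom]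
    by_cases hi : i < t.length
    · rw [if_pos hi, dif_pos hi]
      simp only [lexeme_eq]
      rw [ih _ (by have := Nat.le_max_right (matchLen t i) 1; omega)]
    · rw [if_neg hi, dif_neg hi]

theorem takeFit_eq : ∀ (cs : List (List Char)) (width cl : Int),
    takeFit cs width cl =
      (cs.take (fitLen cs (width - cl)),
       cl + (((cs.take (fitLen cs (width - cl))).map List.length).sum : Nat),
       cs.drop (fitLen cs (width - cl))) := by
  intro cs
  induction cs with
  | nil => intro width cl; simp [takeFit, fitLen]
  | cons c rest ih =>
    intro width cl
    rw [takeFit, fitLen]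
    by_cases h : cl + (c.length : Int) ≤ width
    · rw [if_pos h, if_pos (by omega)]
      simp only []
      rw [ih width (cl + c.length)]
      have harg : width - cl - (c.length : Int) = width - (cl + (c.length : Int)) := by ring
      rw [harg]
      simp only [List.take_succ_cons, List.drop_succ_cons, List.map_cons, List.sum_cons,
        Prod.mk.injEq]
      refine ⟨trivial, by push_cast; ring, trivial⟩
    · rw [if_neg h, if_neg (by omega)]
      simp

theorem handleLong_eq (chunks cur : List (List Char)) (curLen width : Int) (c : List Char)
    (rest : List (List Char)) (hc : chunks = c :: rest) :
    handleLong chunks cur curLen width =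
      (cur ++ [(splitLong c curLen width).1], (splitLong c curLen width).2 :: rest) := by
  subst hc
  rfl

-- continuation shared by the three post-fit cases of the loop-shape lemma below
theorem wrapCont (f : Nat) (width : Int)
    (ih : ∀ (chunks lines : List (List Char)),
      wrapLoop f width chunks lines = lines.reverse ++ buildLines f width chunks (!lines.isEmpty))
    (rest cur lines : List (List Char)) :
    wrapLoop f width rest
      (if (if cur ≠ [] ∧ (PySem.Chars.strip (cur.getLast?.getD [])).isEmpty then cur.dropLast else cur) ≠ []
       then PySem.Chars.join [] (if cur ≠ [] ∧ (PySem.Chars.strip (cur.getLast?.getD [])).isEmpty then cur.dropLast else cur) :: lines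
       else lines) =
    lines.reverse ++
      (if (if cur ≠ [] ∧ (PySem.Chars.strip (cur.getLast?.getD [])).isEmpty then cur.dropLast else cur) = []
       then buildLines f width rest (!lines.isEmpty)
       else PySem.Chars.join [] (if cur ≠ [] ∧ (PySem.Chars.strip (cur.getLast?.getD [])).isEmpty then cur.dropLast else cur) :: buildLines f width rest true) := by
  set c2 := if cur ≠ [] ∧ (PySem.Chars.strip (cur.getLast?.getD [])).isEmpty then cur.dropLast else cur with hc2
  by_cases h : c2 = []
  · rw [if_neg (by simpa using h), if_pos h, ih]
  · rw [if_pos h, if_neg (fun h' => h h'), ih]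
    simp

theorem buildLines_eq : ∀ (fuel : Nat) (width : Int) (chunks lines : List (List Char)),
    wrapLoop fuel width chunks lines =
      lines.reverse ++ buildLines fuel width chunks (!lines.isEmpty) := by
  intro fuel
  induction fuel with
  | zero => intro width chunks lines; simp [wrapLoop, buildLines]
  | succ f ih =>
    intro width chunks lines
    cases chunks with
    | nil => simp [wrapLoop, buildLines]
    | cons c0 rest0 =>
      rw [wrapLoop, buildLines]
      simp only []
      have hcond : ((PySem.Chars.strip c0).isEmpty ∧ lines ≠ []) ↔
          ((!lines.isEmpty) = true ∧ (PySem.Chars.strip c0).isEmpty) := by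
        cases lines <;> simp
      have hchunks1 :
          (if (PySem.Chars.strip c0).isEmpty ∧ lines ≠ [] then rest0 else c0 :: rest0) =
          (if (!lines.isEmpty) = true ∧ (PySem.Chars.strip c0).isEmpty then rest0 else c0 :: rest0) := by
        by_cases h : (PySem.Chars.strip c0).isEmpty ∧ lines ≠ []
        · rw [if_pos h, if_pos (hcond.mp h)]
        · rw [if_neg h, if_neg (fun h' => h (hcond.mpr h'))]
      rw [hchunks1]
      set ws := (if (!lines.isEmpty) = true ∧ (PySem.Chars.strip c0).isEmpty then rest0 else c0 :: rest0) with hws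
      rw [takeFit_eq ws width 0]
      rw [show width - (0 : Int) = width by ring]
      set k := fitLen ws width with hk
      cases hdk : ws.drop k with
      | nil =>
        exact wrapCont f width (fun c l => ih width c l) [] (ws.take k) lines
      | cons ov more =>
        simp only [zero_add]
        by_cases hov : (ov.length : Int) > width
        · rw [if_pos hov, if_pos hov,
            handleLong_eq _ _ _ _ ov more rfl]
          exact wrapCont f width (fun c l => ih width c l)
            ((splitLong ov ((((ws.take k).map List.length).sum : Nat) : Int) width).2 :: more)
            (ws.take k ++ [(splitLong ov ((((ws.take k).map List.length).sum : Nat) : Int) width).1]) lines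
        · rw [if_neg hov, if_neg hov]
          exact wrapCont f width (fun c l => ih width c l) (ov :: more) (ws.take k) lines

theorem wrapB_eq (s : List Char) (width : Int) : pyWrap s width = wrapB s width := by
  unfold pyWrap wrapB splitChunks
  rw [normWS_eq, ← lexFrom_eq (mungeWS s) ((mungeWS s).length + 1) 0 (by omega)]
  rw [buildLines_eq]
  simp

-- ---- the two justify algorithms agree ----

-- extras the round-robin while-loop hands to gap i when m spaces are spread over n1 gaps
def eF (n1 m i : Nat) : Nat :=
  if m = 0 ∨ n1 = 0 then 0
  else (if i < min m n1 then 1 else 0) + eF n1 (m - min m n1) i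
  termination_by m
  decreasing_by omega

theorem eF_of_ge (n1 m i : Nat) (h : n1 ≤ i) : eF n1 m i = 0 := by
  induction m using Nat.strong_induction_on with
  | _ m ih =>
    rw [eF]
    split
    · rfl
    · rw [if_neg (by omega), ih _ (by omega)]

theorem eF_eq_div_mod (n1 : Nat) (hn1 : 0 < n1) : ∀ (m i : Nat), i < n1 →
    eF n1 m i = m / n1 + (if i < m % n1 then 1 else 0) := by
  intro m
  induction m using Nat.strong_induction_on with
  | _ m ih =>
    intro i hi
    rw [eF]
    rcases Nat.eq_zero_or_pos m with hm | hm
    · simp [hm]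
    rw [if_neg (by omega)]
    by_cases hc : m ≤ n1
    · have hmin : min m n1 = m := by omega
      rw [hmin, Nat.sub_self]
      have h0 : eF n1 0 i = 0 := by rw [eF]; simp
      rw [h0]
      rcases Nat.lt_or_ge m n1 with h | h
      · rw [Nat.div_eq_of_lt h, Nat.mod_eq_of_lt h]
        omega
      · have hmn : m = n1 := by omega
        subst hmn
        rw [Nat.div_self hm, Nat.mod_self]
        simp [hi]
    · have hmin : min m n1 = n1 := by omega
      rw [hmin, ih _ (by omega) _ hi]
      have h1 : m / n1 = (m - n1) / n1 + 1 := by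
        conv_lhs => rw [show m = (m - n1) + 1 * n1 by omega]
        rw [Nat.add_mul_div_right _ _ hn1]
      have h2 : m % n1 = (m - n1) % n1 := by
        conv_lhs => rw [show m = (m - n1) + n1 by omega]
        rw [Nat.add_mod_right]
      rw [h1, h2, if_pos (by omega)]
      omega

theorem jsInnerA_spec (n1 : Nat) : ∀ (k i : Nat), n1 - i = k →
    ∀ (items : List (List Char)) (lc : Int), 0 < lc →
    jsInnerA items lc i n1 =
      (items.mapIdx (fun j x => if i ≤ j ∧ j < i + min lc.toNat (n1 - i) then x ++ [' '] else x),
       lc - (min lc.toNat (n1 - i) : Nat)) := by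
  intro k
  induction k using Nat.strong_induction_on with
  | _ k ih => ?_
  intro i hk items lc hlc
  rw [jsInnerA]
  by_cases h : i < n1
  · rw [dif_pos h]
    simp only []
    by_cases h1 : lc - 1 < 1
    · rw [if_pos h1]
      have hmin : min lc.toNat (n1 - i) = 1 := by omega
      rw [hmin]
      simp only [Prod.mk.injEq]
      refine ⟨?_, by push_cast; ring⟩
      apply List.ext_getElem
      · simp
      · intro j hj hj'
        rw [List.getElem_modify, List.getElem_mapIdx]
        split_ifs <;> first | rfl | omega
    · rw [if_neg h1]
      rw [ih (n1 - (i+1)) (by omega) (i+1) rfl _ _ (by omega)]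
      simp only [Prod.mk.injEq]
      have hmin : min (lc - 1).toNat (n1 - (i + 1)) + 1 = min lc.toNat (n1 - i) := by omega
      refine ⟨?_, by push_cast; omega⟩
      apply List.ext_getElem
      · simp
      · intro j hj hj'
        rw [List.getElem_mapIdx, List.getElem_mapIdx, List.getElem_modify]
        split_ifs <;> first | rfl | omega
  · rw [dif_neg h]
    have h0 : n1 - i = 0 := by omega
    rw [h0]
    simp only [Prod.mk.injEq]
    refine ⟨?_, by simp⟩
    apply List.ext_getElem
    · simp
    · intro j hj hj'
      rw [List.getElem_mapIdx, if_neg (by omega)]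

theorem jsOuterA_spec : ∀ (fuel : Nat) (items : List (List Char)) (lc : Int), lc.toNat < fuel →
    jsOuterA fuel items lc =
      items.mapIdx (fun i x => x ++ List.replicate (eF (items.length - 1) lc.toNat i) ' ') := by
  intro fuel
  induction fuel with
  | zero => intro items lc h; omega
  | succ f ihf =>
    intro items lc hfu
    rw [jsOuterA]
    by_cases hc : lc > 0 ∧ items.length > 1
    · rw [if_pos hc]
      simp only []
      rw [jsInnerA_spec (items.length - 1) _ 0 rfl _ _ hc.1]
      simp only [Nat.zero_add, Nat.sub_zero]
      set n1 := items.length - 1 with hn1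
      have hn1p : 0 < n1 := by omega
      have hm : 0 < lc.toNat := by omega
      rw [ihf _ _ (by omega)]
      have hlen : (List.mapIdx (fun j x => if 0 ≤ j ∧ j < min lc.toNat n1 then x ++ [' '] else x) items).length = items.length := by simp
      rw [hlen]
      have htn : (lc - (min lc.toNat n1 : Nat)).toNat = lc.toNat - min lc.toNat n1 := by omega
      rw [htn]
      apply List.ext_getElem
      · simp
      · intro j hj hj'
        rw [List.getElem_mapIdx, List.getElem_mapIdx, List.getElem_mapIdx]
        have he : eF n1 lc.toNat j = (if j < min lc.toNat n1 then 1 else 0) + eF n1 (lc.toNat - min lc.toNat n1) j := by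
          rw [eF]; rw [if_neg (by omega)]
        rw [he]
        split_ifs with h1 h2
        · rw [List.append_assoc]
          congr 1
          rw [List.replicate_add]
          rfl
        · omega
        · omega
        · simp [← hn1]
    · rw [if_neg hc]
      by_cases hlc : lc ≤ 0
      · have : lc.toNat = 0 := by omega
        rw [this]
        apply List.ext_getElem
        · simp
        · intro j hj hj'
          rw [List.getElem_mapIdx]
          rw [eF]
          simp
      · have hlen : items.length ≤ 1 := by
          rcases not_and_or.mp hc with h | h
          · omega
          · omega
        have : items.length - 1 = 0 := by omega
        rw [this]
        apply List.ext_getElem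
        · simp
        · intro j hj hj'
          rw [List.getElem_mapIdx]
          rw [eF]
          simp

-- A's justified line, written by recursion on the word list (f j = extra spaces of gap j)
def AJ : List (List Char) → (Nat → Nat) → List Char
  | [], _ => []
  | [wd], f => wd ++ List.replicate (f 0) ' '
  | wd :: ws, f => wd ++ (' ' :: List.replicate (f 0) ' ') ++ AJ ws (fun i => f (i + 1))

-- B's justified line in the same shape (g j = full width of gap j, last word explicit)
def BJ : List (List Char) → (Nat → Nat) → List Char → List Char
  | [], _, last => last
  | wd :: ws, g, last => wd ++ List.replicate (g 0) ' ' ++ BJ ws (fun i => g (i + 1)) last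

theorem AJ_cons_cons (a b : List Char) (t : List (List Char)) (f : Nat → Nat) :
    AJ (a :: b :: t) f = a ++ (' ' :: List.replicate (f 0) ' ') ++ AJ (b :: t) (fun i => f (i + 1)) := rfl

theorem A_join : ∀ (ws : List (List Char)) (f : Nat → Nat),
    PySem.Chars.join [] ((addTrailingSpace ws).mapIdx (fun j x => x ++ List.replicate (f j) ' ')) =
      AJ ws f := by
  intro ws
  induction ws with
  | nil => intro f; simp [addTrailingSpace, AJ, PySem.Chars.join_nil]
  | cons wd ws ih =>
    intro f
    match ws with
    | [] => simp [addTrailingSpace, AJ, PySem.Chars.join_singleton]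
    | w2 :: rest =>
      show PySem.Chars.join [] (List.mapIdx _ ((wd ++ [' ']) :: addTrailingSpace (w2 :: rest))) = _
      rw [List.mapIdx_cons]
      have hne : addTrailingSpace (w2 :: rest) ≠ [] := by
        cases rest <;> simp [addTrailingSpace]
      obtain ⟨y, ys, hys⟩ : ∃ y ys, addTrailingSpace (w2 :: rest) = y :: ys := by
        cases h : addTrailingSpace (w2 :: rest) with
        | nil => exact absurd h hne
        | cons y ys => exact ⟨y, ys, rfl⟩
      rw [hys, List.mapIdx_cons, PySem.Chars.join_cons_cons]
      rw [show (y ++ List.replicate (f (0+1)) ' ') ::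
            List.mapIdx (fun i x => x ++ List.replicate (f (i+1+1)) ' ') ys =
          List.mapIdx (fun j x => x ++ List.replicate ((fun k => f (k+1)) j) ' ') (y :: ys) by
        rw [List.mapIdx_cons]]
      rw [← hys, ih (fun k => f (k+1))]
      rw [AJ_cons_cons]
      simp

theorem joinNil_eq_flatten : ∀ l : List (List Char), PySem.Chars.join [] l = l.flatten := by
  intro l
  induction l with
  | nil => simp [PySem.Chars.join_nil]
  | cons a t ih =>
    cases t with
    | nil => simp [PySem.Chars.join_singleton]
    | cons b t' =>
      rw [PySem.Chars.join_cons_cons, ih]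
      simp

theorem BJ_congr : ∀ (ws : List (List Char)) (g g' : Nat → Nat) (last : List Char),
    (∀ i, g i = g' i) → BJ ws g last = BJ ws g' last := by
  intro ws
  induction ws with
  | nil => intros; rfl
  | cons wd ws ih =>
    intro g g' last h
    rw [BJ, BJ, h 0, ih (fun i => g (i+1)) (fun i => g' (i+1)) last (fun i => h (i+1))]

theorem B_join_gen : ∀ (ws : List (List Char)) (s : Nat) (g : Nat → Nat) (last : List Char),
    PySem.Chars.join []
      ((PySem.List.enumerate ws (s : Int)).foldl
          (fun acc p => acc ++ [p.2, List.replicate (g p.1.toNat) ' ']) [] ++ [last]) =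
      BJ ws (fun i => g (s + i)) last := by
  intro ws
  induction ws with
  | nil =>
    intro s g last
    simp [PySem.List.enumerate_nil, BJ]
  | cons wd ws ih =>
    intro s g last
    rw [PySem.List.foldl_append_eq_flatMap, PySem.List.enumerate_cons, joinNil_eq_flatten]
    have hs1 : (s : Int) + 1 = ((s + 1 : Nat) : Int) := by push_cast; ring
    have hih := ih (s + 1) g last
    rw [joinNil_eq_flatten, PySem.List.foldl_append_eq_flatMap] at hih
    simp only [List.flatMap_cons, List.nil_append, List.flatten_append, List.flatten_cons] at *
    rw [BJ]
    have hbj : BJ ws (fun i => (fun k => g (s + k)) (i + 1)) last = BJ ws (fun i => g (s + 1 + i)) last :=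
      BJ_congr _ _ _ _ (fun i => by simp only []; congr 1; omega)
    rw [hbj, ← hih, hs1]
    simp

theorem AJ_eq_BJ : ∀ (ws : List (List Char)) (wd : List Char) (f g : Nat → Nat),
    (∀ i, i < ws.length → g i = 1 + f i) → f ws.length = 0 →
    AJ (wd :: ws) f = BJ (wd :: ws).dropLast g ((wd :: ws).getLast (by simp)) := by
  intro ws
  induction ws with
  | nil =>
    intro wd f g _ hlast
    simp only [List.length_nil] at hlast
    simp [AJ, BJ, hlast]
  | cons w2 rest ih =>
    intro wd f g hg hlast
    rw [AJ_cons_cons]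
    have h1 : (wd :: w2 :: rest).dropLast = wd :: (w2 :: rest).dropLast := by simp
    have h2 : (wd :: w2 :: rest).getLast (by simp) = (w2 :: rest).getLast (by simp) := by
      rw [List.getLast_cons]
    rw [h1, h2, BJ]
    rw [← ih w2 (fun i => f (i + 1)) (fun i => g (i + 1))
        (fun i hi => hg (i + 1) (by simpa using Nat.succ_lt_succ hi)) (by simpa using hlast)]
    rw [hg 0 (by simp)]
    simp [List.replicate_add]

theorem join_addTrailingSpace : ∀ ws : List (List Char),
    PySem.Chars.join [] (addTrailingSpace ws) = PySem.Chars.join [' '] ws := by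
  intro ws
  induction ws with
  | nil => rfl
  | cons wd ws ih =>
    cases ws with
    | nil => rfl
    | cons w2 rest =>
      show PySem.Chars.join [] ((wd ++ [' ']) :: addTrailingSpace (w2 :: rest)) = _
      obtain ⟨y, ys, hys⟩ : ∃ y ys, addTrailingSpace (w2 :: rest) = y :: ys := by
        cases rest <;> exact ⟨_, _, rfl⟩
      rw [hys, PySem.Chars.join_cons_cons, ← hys, ih, PySem.Chars.join_cons_cons]
      simp

theorem slice_neg_one_none {α : Type} (l : List α) (h : l ≠ []) :
    PySem.List.slice l (some (-1)) none = [l.getLast h] := by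
  unfold PySem.List.slice PySem.List.clampIdx
  have hlen : 1 ≤ l.length := List.length_pos_iff.mpr h
  simp only []
  rw [if_pos (by omega), if_neg (by omega)]
  have h1 : ((l.length : Int) + (-1)).toNat = l.length - 1 := by omega
  rw [h1]
  have h2 : l.length - (l.length - 1) = 1 := by omega
  rw [h2]
  rw [List.getLast_eq_getElem]
  rw [List.take_one, List.head?_drop]
  simp [List.getElem?_eq_getElem (by omega : l.length - 1 < l.length)]

theorem pyGetD_neg_one {α : Type} (l : List α) (d : α) (h : l ≠ []) :
    PySem.List.pyGetD l (-1) d = l.getLast h := by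
  have hlen : 1 ≤ l.length := List.length_pos_iff.mpr h
  unfold PySem.List.pyGetD PySem.List.pyGet? PySem.List.pyIdx?
  rw [if_neg (by omega), if_pos (by omega)]
  have h1 : l.length - ((1:Int)).toNat = l.length - 1 := by omega
  simp only [show -(-1:Int) = 1 from rfl, h1]
  rw [List.getLast_eq_getElem]
  simp [List.getElem?_eq_getElem (by omega : l.length - 1 < l.length)]

theorem length_addTrailingSpace : ∀ ws : List (List Char),
    (addTrailingSpace ws).length = ws.length := by
  intro ws
  induction ws with
  | nil => rfl
  | cons wd ws ih =>
    cases ws with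
    | nil => rfl
    | cons w2 rest =>
      show ((wd ++ [' ']) :: addTrailingSpace (w2 :: rest)).length = _
      simp only [List.length_cons]
      rw [ih]
      simp

theorem sum_addTrailingSpace : ∀ ws : List (List Char),
    ((addTrailingSpace ws).map List.length).sum = (ws.map List.length).sum + (ws.length - 1) := by
  intro ws
  induction ws with
  | nil => rfl
  | cons wd ws ih =>
    cases ws with
    | nil => rfl
    | cons w2 rest =>
      show (((wd ++ [' ']) :: addTrailingSpace (w2 :: rest)).map List.length).sum = _
      simp only [List.map_cons, List.sum_cons, List.length_append, List.length_cons] at *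
      rw [ih]
      simp
      omega

theorem mapIdx_append_rep_zero (items : List (List Char)) (e : Nat → Nat) (h : ∀ i, e i = 0) :
    items.mapIdx (fun i x => x ++ List.replicate (e i) ' ') = items := by
  apply List.ext_getElem
  · simp
  · intro j hj hj'
    rw [List.getElem_mapIdx, h j]
    simp

theorem justifyStr_eq (s : List Char) (w : Int) : justifyStrA s w = justifyStrB s w := by
  unfold justifyStrA justifyStrB
  simp only []
  cases hws : PySem.Chars.split₀ s with
  | nil =>
    rw [jsOuterA_spec _ _ _ (by omega)]
    simp [addTrailingSpace]
  | cons w0 wrest => ?_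
  cases wrest with
  | nil =>
    rw [jsOuterA_spec _ _ _ (by omega)]
    rw [if_pos (by simp)]
    rw [mapIdx_append_rep_zero _ _ (fun i => by simp [addTrailingSpace]; rw [eF]; simp)]
    rfl
  | cons w1 wr2 =>
    rw [if_neg (by simp)]
    rw [jsOuterA_spec _ _ _ (by omega), A_join]
    rw [length_addTrailingSpace]
    set words := w0 :: w1 :: wr2 with hwords
    have hn : words.length = wr2.length + 2 := by simp [hwords]
    set n1 : Nat := wr2.length + 1 with hn1def
    have hn1 : words.length - 1 = n1 := by omega
    rw [hn1]
    have hsum : ((addTrailingSpace words).map List.length).sum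
        = (words.map List.length).sum + n1 := by
      rw [sum_addTrailingSpace]; omega
    set sumW : Nat := (words.map List.length).sum with hsw
    set lc : Int := w - ((addTrailingSpace words).map List.length).sum with hlc
    set extra : Int := w - (sumW : Int) - ((words.length : Int) - 1) with hex
    have hle : lc = extra := by rw [hlc, hex, hsum]; push_cast; omega
    by_cases hx : extra ≤ 0
    · rw [if_pos hx]
      have h0 : lc.toNat = 0 := by omega
      rw [h0]
      rw [← A_join, mapIdx_append_rep_zero _ _ (fun i => by rw [eF]; simp)]
      exact join_addTrailingSpace words
    · rw [if_neg hx]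
      have hm0 : 0 < lc := by omega
      set m : Nat := lc.toNat with hmdef
      have hmc : (m : Int) = extra := by omega
      have hgaps : (words.length : Int) - 1 = (n1 : Int) := by omega
      have hq : PySem.Int.floordiv extra ((words.length : Int) - 1) = ((m / n1 : Nat) : Int) := by
        rw [hgaps, ← hmc, PySem.Int.floordiv_natCast]
      have hr : PySem.Int.mod extra ((words.length : Int) - 1) = ((m % n1 : Nat) : Int) := by
        rw [hgaps, ← hmc, PySem.Int.mod_natCast]
      rw [hq, hr]
      -- the fold's per-gap index p.1 is a nonnegative Int: rewrite its body through p.1.toNat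
      have hfold :
          (PySem.List.enumerate words.dropLast 0).foldl
            (fun acc p => acc ++ [p.2, List.replicate
              (1 + ((m / n1 : Nat) : Int) + (if p.1 < ((m % n1 : Nat) : Int) then 1 else 0)).toNat ' ']) []
          = (PySem.List.enumerate words.dropLast (((0 : Nat)) : Int)).foldl
            (fun acc p => acc ++ [p.2, List.replicate
              (1 + ((m / n1 : Nat) : Int) + (if ((p.1.toNat : Int)) < ((m % n1 : Nat) : Int) then 1 else 0)).toNat ' ']) [] := by
        apply PySem.List.foldl_congr_mem
        intro acc p hp
        obtain ⟨k, hk, hpk⟩ := (PySem.List.mem_enumerate_iff _ _ _).mp hp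
        subst hpk
        simp
      have hBJ := B_join_gen words.dropLast 0
        (fun k : Nat => (1 + ((m / n1 : Nat) : Int) + (if (k : Int) < ((m % n1 : Nat) : Int) then 1 else 0)).toNat)
        (PySem.List.pyGetD words (-1) [])
      rw [hfold, hBJ]
      rw [pyGetD_neg_one _ _ (by simp [hwords])]
      have hn1p : 0 < n1 := by omega
      refine AJ_eq_BJ (w1 :: wr2) w0 (eF n1 m) _ ?_ ?_
      · intro i hi
        have hilt : i < n1 := by simp at hi; omega
        simp only [Nat.zero_add]
        rw [eF_eq_div_mod n1 hn1p m i hilt]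
        by_cases hir : i < m % n1
        · rw [if_pos (show ((i : Nat) : Int) < ((m % n1 : Nat) : Int) by exact_mod_cast hir),
              if_pos hir]
          generalize m / n1 = a
          omega
        · rw [if_neg (show ¬ ((i : Nat) : Int) < ((m % n1 : Nat) : Int) by exact_mod_cast hir),
              if_neg hir]
          generalize m / n1 = a
          omega
      · exact eF_of_ge n1 m _ (by simp; omega)

theorem jpAlign_cons_cons (a b : List Char) (t : List (List Char)) (w : Int) :
    jpAlign (a :: b :: t) w = justifyStrA a w :: jpAlign (b :: t) w := rfl

theorem jpAlign_eq (w : Int) : ∀ lines : List (List Char),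
    jpAlign lines w =
      lines.dropLast.map (fun l => justifyStrB l w) ++ PySem.List.slice lines (some (-1)) none := by
  intro lines
  induction lines with
  | nil => simp [jpAlign, PySem.List.slice, PySem.List.clampIdx]
  | cons l rest ih =>
    cases rest with
    | nil =>
      rw [slice_neg_one_none _ (by simp)]
      simp [jpAlign]
    | cons l2 r2 =>
      rw [jpAlign_cons_cons, justifyStr_eq, ih]
      rw [slice_neg_one_none (l :: l2 :: r2) (by simp), slice_neg_one_none (l2 :: r2) (by simp)]
      simp [List.getLast_cons]

-- ===== VERDICT (by name: the statement is the Claim_ definition above) =====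
theorem justify_p_spec : Claim_equal_justify_p := by
  intro para width _ _
  show justify_p para width = justify_p_alt para width
  unfold justify_p justify_p_alt
  rw [wrapB_eq]
  simp only [jpAlign_eq]
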